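/- GENERATED by farm/mkstatement.py from design/units.tsv (unit `cos`) and the Specs of Vorbis/Spec/*.lean — do not edit.
   THE STATEMENT of the proof unit `cos`: the function `cos` (3 instructions) satisfies its contract,
   given the contracts of its callees. What the names mean: Vorbis/Spec/Basic.lean. The theorem to prove:
   `theorem cos_ok : Vorbis.Spec.cos.Statement`. -/
import Vorbis.Spec.Libm
namespace Vorbis.Spec.cos
open X86 X86.User Asan

/-- The statement of unit `cos`. -/
def Statement : Prop :=
  ∀ (Lay : Layout) (_hLay : Lay.hi = 0x1000000) (μ : Microarch) (_hμ : UserX.MicroOK μ) (u₀ : State)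
    (_hcode : HasCodeNat Lay u₀ Vorbis.L.cos.entry Vorbis.Code.code_cos.nat Vorbis.L.cos.size)
    (_h_sincos_quadrant : ∀ (others : List Obj) (frames : List (Nat × FrameLayout)), Calls Lay μ Vorbis.WayInv (Vorbis.conv u₀) Vorbis.L.sincos_quadrant.entry (Vorbis.Spec.sincos_quadrant.spec others frames)),
    ∀ (others : List Obj) (frames : List (Nat × FrameLayout)), Calls Lay μ Vorbis.WayInv (Vorbis.conv u₀) Vorbis.L.cos.entry (Vorbis.Spec.cos.spec others frames)

end Vorbis.Spec.cos
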